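-- pv_equiv track=rewrite | github.com/pangeran-bottor/coding_challenges | binarysearch.io/weekly_contest_16/split_list.py | solve
-- ===== SOURCE A (Python) =====
-- def solve(nums):
--     # Write your code here
--     max_from_left = [0] * len(nums)
--     min_from_right = [0] * len(nums)
--
--     max_val = float("-inf")
--     min_val = float("inf")
--
--     for i in range(len(nums)):
--         max_val = max(max_val, nums[i])
--         max_from_left[i] = max_val
--     for i in range(len(nums)-1, -1, -1):
--         min_val = min(min_val, nums[i])
--         min_from_right[i] = min_val
--
--     for i in range(len(nums)-1):
--         if max_from_left[i] < min_from_right[i+1]: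
--             return True
--     return False
-- ===== SOURCE B (Python) =====
-- def solve(nums):
--     # Partition-boundary tracking (LeetCode-915 style): one forward pass, no
--     # suffix-min table. `boundary` is the last index forced into the left part,
--     # `left_max` the max of nums[:boundary+1], `cur_max` the running max.
--     if len(nums) < 2:
--         return False
--     boundary = 0
--     left_max = cur_max = nums[0]
--     for i in range(1, len(nums)):
--         if nums[i] <= left_max:
--             boundary = i
--             left_max = cur_max
--         else:
--             cur_max = max(cur_max, nums[i])
--     return boundary < len(nums) - 1
-- ===== Notes on version B (the rewrite author's own statement) =====
-- stated objective: faster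
-- what changed: B replaces A's prefix-max/suffix-min tables and comparison pass by LeetCode-915-style partition-boundary tracking: a single forward pass keeps the last index forced into the left part plus two running maxima, and the answer is whether that boundary stays before the last index.
import Mathlib
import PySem

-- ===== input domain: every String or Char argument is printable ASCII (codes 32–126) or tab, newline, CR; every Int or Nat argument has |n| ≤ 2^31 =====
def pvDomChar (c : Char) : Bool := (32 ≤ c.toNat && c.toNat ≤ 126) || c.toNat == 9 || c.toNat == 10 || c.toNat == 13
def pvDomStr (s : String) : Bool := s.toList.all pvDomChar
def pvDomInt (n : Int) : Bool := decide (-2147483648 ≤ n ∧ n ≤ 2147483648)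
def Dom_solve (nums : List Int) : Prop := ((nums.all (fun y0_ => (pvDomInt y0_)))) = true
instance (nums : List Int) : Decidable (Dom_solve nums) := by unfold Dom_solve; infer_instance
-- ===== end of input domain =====

-- B abandons A's prefix-max/suffix-min tables for one-pass partition-boundary tracking (alternative algorithm, O(1) extra space).

-- ===== PORT A =====
-- Python's float("-inf")/float("inf") seeds are modelled as Option Int: `none` = not yet any
-- element, so `max(-inf, x) = x` / `min(inf, x) = x` exactly (only Ints are ever stored/compared).
def pvMaxO (m : Option Int) (x : Int) : Int :=
  match m with
  | none => x
  | some v => max v x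

def pvMinO (m : Option Int) (x : Int) : Int :=
  match m with
  | none => x
  | some v => min v x

-- first loop: forward, writing max_from_left[i] at increasing i (= building by cons)
def buildMaxL : List Int → Option Int → List Int
  | [], _ => []
  | x :: xs, m => let m' := pvMaxO m x; m' :: buildMaxL xs (some m')

-- second loop: i from n-1 downto 0 over nums, writing min_from_right[i] (= prepend while
-- consuming nums reversed)
def buildMinR : List Int → Option Int → List Int → List Int
  | [], _, acc => acc
  | x :: xs, m, acc => let m' := pvMinO m x; buildMinR xs (some m') (m' :: acc)

-- third loop: i in range(n-1), test max_from_left[i] < min_from_right[i+1]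
def chkA : List Int → List Int → Bool
  | a :: as, _ :: b :: bs => if a < b then true else chkA as (b :: bs)
  | _, _ => false

def solve (nums : List Int) : Bool :=
  chkA (buildMaxL nums none) (buildMinR nums.reverse none [])

-- ===== PORT B =====
-- the loop `for i in range(1, len(nums))`: state (boundary, left_max, cur_max)
def bLoop : List Int → Nat → Nat → Int → Int → Nat
  | [], _, b, _, _ => b
  | x :: xs, i, b, lm, cm =>
      if x ≤ lm then bLoop xs (i + 1) i cm cm
      else bLoop xs (i + 1) b lm (max cm x)

def solve_alt (nums : List Int) : Bool :=
  match nums with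
  | [] => false
  | x :: xs =>
      if (x :: xs).length < 2 then false
      else decide (bLoop xs 1 0 x x < (x :: xs).length - 1)

-- ===== PRECONDITION & SPEC =====
def Spec_solve (nums : List Int) (out : Bool) : Prop := out = solve_alt nums
instance (nums : List Int) (out : Bool) : Decidable (Spec_solve nums out) := by unfold Spec_solve; infer_instance

-- ===== CLAIM (what is proved, stated in full; the proofs are below) =====
def Claim_equal_solve : Prop := ∀ (nums : List Int), Dom_solve nums → Spec_solve nums (solve nums)

-- ===== LEMMAS AND PROOFS =====

-- ---- proof-only helper definitions ----

-- left-to-right cumulative mins (cons-built); state fold of the mins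
def scanMin : List Int → Option Int → List Int
  | [], _ => []
  | x :: xs, m => let m' := pvMinO m x; m' :: scanMin xs (some m')

def stMin : Option Int → List Int → Option Int
  | m, [] => m
  | m, x :: xs => stMin (some (pvMinO m x)) xs

-- structural right-to-left suffix-min table
def sufMin : List Int → List Int
  | [] => []
  | x :: xs =>
      match sufMin xs with
      | [] => [x]
      | b :: bs => min x b :: b :: bs

-- reference recursive program: prefix max as Option, quadratic check
def R : Option Int → List Int → Bool
  | _, [] => false
  | m, x :: xs =>
      let m' := pvMaxO m x
      ((!xs.isEmpty) && xs.all (fun y => decide (m' < y))) || R (some m') xs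

def mLt : Option Int → Int → Prop
  | none, _ => True
  | some a, y => a < y

def Good (nums : List Int) (i : Nat) : Prop :=
  i + 1 < nums.length ∧ ∀ y ∈ nums.drop (i + 1), ∀ x ∈ nums.take (i + 1), x < y

def ExSplit (nums : List Int) : Prop := ∃ i, Good nums i

def IsMaxOf (l : List Int) (v : Int) : Prop := v ∈ l ∧ ∀ x ∈ l, x ≤ v

-- ---- A-side: buildMinR over the reversed list = structural sufMin ----

theorem buildMinR_scan (xs : List Int) : ∀ (m : Option Int) (acc : List Int),
    buildMinR xs m acc = (scanMin xs m).reverse ++ acc := by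
  induction xs with
  | nil => intro m acc; simp [buildMinR, scanMin]
  | cons x xs ih =>
      intro m acc
      simp only [buildMinR, scanMin]
      rw [ih]
      simp

theorem stMin_append (bs : List Int) : ∀ (as : List Int) (m : Option Int),
    stMin m (as ++ bs) = stMin (stMin m as) bs := by
  intro as
  induction as with
  | nil => intro m; simp [stMin]
  | cons a as ih => intro m; simp [stMin, ih]

theorem pvMinO_swap (m : Option Int) (x y : Int) :
    pvMinO (some (pvMinO m x)) y = pvMinO (some (pvMinO m y)) x := by
  cases m <;> simp [pvMinO] <;> omega

theorem stMin_push (l : List Int) : ∀ (m : Option Int) (x : Int),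
    stMin (some (pvMinO m x)) l = some (pvMinO (stMin m l) x) := by
  induction l with
  | nil => intro m x; simp [stMin]
  | cons y l ih =>
      intro m x
      simp only [stMin]
      rw [pvMinO_swap, ih]

theorem stMin_reverse (l : List Int) : ∀ (m : Option Int),
    stMin m l.reverse = stMin m l := by
  induction l with
  | nil => intro m; simp
  | cons x l ih =>
      intro m
      simp only [List.reverse_cons]
      rw [stMin_append, ih, stMin]
      simp [stMin, stMin_push]

theorem sufMin_cons (x : Int) (l : List Int) :
    sufMin (x :: l) = pvMinO (stMin none l) x :: sufMin l := by
  induction l generalizing x with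
  | nil => simp [sufMin, stMin, pvMinO]
  | cons y ys ih =>
      rw [sufMin, ih y]
      have h : stMin none (y :: ys) = some (pvMinO (stMin none ys) y) := by
        show stMin (some (pvMinO none y)) ys = _
        rw [stMin_push]
      rw [h]
      simp [pvMinO, min_comm]

theorem scanMin_rev_eq_sufMin (l : List Int) :
    (scanMin l.reverse none).reverse = sufMin l := by
  induction l with
  | nil => simp [scanMin, sufMin]
  | cons x l ih =>
      have happ : ∀ (as : List Int) (m : Option Int) (z : Int),
          scanMin (as ++ [z]) m = scanMin as m ++ [pvMinO (stMin m as) z] := by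
        intro as
        induction as with
        | nil => intro m z; simp [scanMin, stMin]
        | cons a as ih2 => intro m z; simp [scanMin, stMin, ih2]
      rw [List.reverse_cons, happ, sufMin_cons, stMin_reverse]
      simp [ih]

-- ---- A-side: chkA over the tables = reference R ----

theorem stMin_some_lt (l : List Int) : ∀ (a : Int), ∃ v, stMin (some a) l = some v ∧
    ∀ r : Int, r < v ↔ (r < a ∧ ∀ y ∈ l, r < y) := by
  induction l with
  | nil => intro a; exact ⟨a, rfl, by simp⟩
  | cons y l ih =>
      intro a
      obtain ⟨v, hv, hr⟩ := ih (min a y)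
      refine ⟨v, by simpa [stMin, pvMinO] using hv, ?_⟩
      intro r
      rw [hr r, lt_min_iff]
      constructor
      · rintro ⟨⟨h1, h2⟩, h3⟩; exact ⟨h1, by simpa using And.intro h2 h3⟩
      · rintro ⟨h1, h⟩; simp at h; exact ⟨⟨h1, h.1⟩, h.2⟩

theorem lt_sufHead (z : Int) (zs : List Int) (r : Int) :
    r < pvMinO (stMin none zs) z ↔ ∀ y ∈ z :: zs, r < y := by
  cases zs with
  | nil => simp [stMin, pvMinO]
  | cons w ws =>
      have h : stMin none (w :: ws) = stMin (some w) ws := by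
        simp [stMin, pvMinO]
      obtain ⟨v, hv, hr⟩ := stMin_some_lt ws w
      rw [h, hv]
      simp only [pvMinO, lt_min_iff, hr]
      constructor
      · rintro ⟨⟨h1, h2⟩, h3⟩; intro y hy
        rcases List.mem_cons.1 hy with rfl | hy
        · exact h3
        · rcases List.mem_cons.1 hy with rfl | hy
          · exact h1
          · exact h2 y hy
      · intro hall
        exact ⟨⟨hall w (by simp), fun y hy => hall y (by simp [hy])⟩, hall z (by simp)⟩

theorem R_cons (m : Option Int) (x : Int) (xs : List Int) :
    R m (x :: xs) =
      (((!xs.isEmpty) && xs.all fun y => decide (pvMaxO m x < y)) || R (some (pvMaxO m x)) xs) :=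
  rfl

theorem chkA_cons (a c b : Int) (as bs : List Int) :
    chkA (a :: as) (c :: b :: bs) = if a < b then true else chkA as (b :: bs) :=
  rfl

theorem chkA_eq_R (l : List Int) : ∀ (m : Option Int),
    chkA (buildMaxL l m) (sufMin l) = R m l := by
  induction l with
  | nil => intro m; simp [buildMaxL, sufMin, chkA, R]
  | cons x xs ih =>
      intro m
      cases xs with
      | nil => simp [buildMaxL, sufMin, chkA, R]
      | cons z zs =>
          have hsuf2 : sufMin (z :: zs) = pvMinO (stMin none zs) z :: sufMin zs :=
            sufMin_cons z zs
          have hsuf1 : sufMin (x :: z :: zs) =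
              pvMinO (stMin none (z :: zs)) x :: pvMinO (stMin none zs) z :: sufMin zs := by
            rw [sufMin_cons, hsuf2]
          have hbuild : buildMaxL (x :: z :: zs) m =
              pvMaxO m x :: buildMaxL (z :: zs) (some (pvMaxO m x)) := rfl
          rw [hbuild, hsuf1, chkA_cons, ← hsuf2, ih (some (pvMaxO m x)), R_cons m x (z :: zs)]
          by_cases h : pvMaxO m x < pvMinO (stMin none zs) z
          · rw [if_pos h]
            have hall : ∀ y ∈ z :: zs, pvMaxO m x < y := (lt_sufHead z zs _).1 h
            have : ((z :: zs).all fun y => decide (pvMaxO m x < y)) = true := by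
              simpa [List.all_eq_true] using hall
            simp [this]
          · rw [if_neg h]
            have hnall : ¬ ∀ y ∈ z :: zs, pvMaxO m x < y :=
              fun hc => h ((lt_sufHead z zs _).2 hc)
            have : ((z :: zs).all fun y => decide (pvMaxO m x < y)) = false := by
              by_contra hc
              simp only [Bool.not_eq_false, List.all_eq_true, decide_eq_true_eq] at hc
              exact hnall hc
            simp [this]

theorem solve_eq_R (nums : List Int) : solve nums = R none nums := by
  rw [solve, buildMinR_scan, scanMin_rev_eq_sufMin]
  simpa using chkA_eq_R nums none

-- ---- R = the split specification ----

theorem R_iff (l : List Int) : ∀ (m : Option Int),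
    R m l = true ↔ ∃ i, i + 1 < l.length ∧
      ∀ y ∈ l.drop (i + 1), mLt m y ∧ ∀ x ∈ l.take (i + 1), x < y := by
  induction l with
  | nil => intro m; simp [R]
  | cons x xs ih =>
      intro m
      have hmax : ∀ y : Int, pvMaxO m x < y ↔ mLt m y ∧ x < y := by
        intro y; cases m <;> simp [pvMaxO, mLt]
      simp only [R, Bool.or_eq_true, Bool.and_eq_true, List.all_eq_true, decide_eq_true_eq,
        Bool.not_eq_true', List.isEmpty_eq_false_iff, ih]
      constructor
      · rintro (⟨hne, hall⟩ | ⟨j, hj, hrest⟩)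
        · refine ⟨0, by simp only [List.length_cons]; have := List.length_pos_iff.2 hne; omega, ?_⟩
          intro y hy
          simp only [List.drop_succ_cons, List.drop_zero] at hy
          have := (hmax y).1 (hall y hy)
          exact ⟨this.1, by simpa using this.2⟩
        · refine ⟨j + 1, by simpa using hj, ?_⟩
          intro y hy
          simp only [List.drop_succ_cons] at hy
          have := hrest y hy
          have h2 := (hmax y).1 this.1
          refine ⟨h2.1, ?_⟩
          intro a ha
          simp only [List.take_succ_cons, List.mem_cons] at ha
          rcases ha with rfl | ha
          · exact h2.2
          · exact this.2 a ha
      · rintro ⟨i, hi, hrest⟩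
        cases i with
        | zero =>
            left
            refine ⟨by apply List.length_pos_iff.1; simp only [List.length_cons] at hi; omega, ?_⟩
            intro y hy
            have := hrest y (by simpa using hy)
            exact (hmax y).2 ⟨this.1, this.2 x (by simp)⟩
        | succ j =>
            right
            refine ⟨j, by simpa using hi, ?_⟩
            intro y hy
            have := hrest y (by simpa using hy)
            refine ⟨(hmax y).2 ⟨this.1, this.2 x (by simp)⟩, ?_⟩
            intro a ha
            exact this.2 a (by simp [ha])

theorem R_none_iff (l : List Int) : R none l = true ↔ ExSplit l := by
  rw [R_iff]
  unfold ExSplit Good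
  constructor
  · rintro ⟨i, h1, h2⟩; exact ⟨i, h1, fun y hy x hx => (h2 y hy).2 x hx⟩
  · rintro ⟨i, h1, h2⟩; exact ⟨i, h1, fun y hy => ⟨trivial, fun x hx => h2 y hy x hx⟩⟩

-- ---- B-side: the boundary loop meets the split specification ----

theorem bLoop_le (rest : List Int) : ∀ (pre : List Int) (b : Nat) (lm cm : Int) (s : Nat),
    b < pre.length → IsMaxOf (pre.take (b + 1)) lm → IsMaxOf pre cm →
    Good (pre ++ rest) s → b ≤ s →
    bLoop rest pre.length b lm cm ≤ s := by
  induction rest with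
  | nil => intro pre b lm cm s _ _ _ _ hbs; simpa [bLoop] using hbs
  | cons x rest ih =>
      intro pre b lm cm s hb hlm hcm hg hbs
      have hlmcm : lm ≤ cm := hcm.2 lm (List.mem_of_mem_take hlm.1)
      have hassoc : pre ++ x :: rest = (pre ++ [x]) ++ rest := by simp
      simp only [bLoop]
      by_cases hx : x ≤ lm
      · rw [if_pos hx]
        -- boundary moves to i = pre.length; show pre.length ≤ s
        have hps : pre.length ≤ s := by
          by_contra hlt
          rw [Nat.not_le] at hlt
          -- s < pre.length : x is in the drop, lm in the take, Good gives lm < x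
          have hxmem : x ∈ (pre ++ x :: rest).drop (s + 1) := by
            rw [List.drop_append_of_le_length (by omega)]
            simp
          have hlmmem : lm ∈ (pre ++ x :: rest).take (s + 1) := by
            rw [List.take_append_of_le_length (by omega)]
            have hpref : pre.take (b + 1) <+: pre.take (s + 1) :=
              List.take_prefix_take_left (by omega)
            exact hpref.subset hlm.1
          have := hg.2 x hxmem lm hlmmem
          omega
        have h1 : (pre ++ [x]).length = pre.length + 1 := by simp
        have := ih (pre ++ [x]) pre.length cm cm s (by simp)
          (by
            constructor
            · rw [List.take_of_length_le (by simp)]; exact List.mem_append_left _ hcm.1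
            · intro a ha
              rw [List.take_of_length_le (by simp)] at ha
              rcases List.mem_append.1 ha with ha | ha
              · exact hcm.2 a ha
              · simp at ha; omega)
          (by
            constructor
            · exact List.mem_append_left _ hcm.1
            · intro a ha
              rcases List.mem_append.1 ha with ha | ha
              · exact hcm.2 a ha
              · simp at ha; omega)
          (by rwa [← hassoc]) hps
        rw [← h1]
        exact this
      · rw [if_neg hx]
        have h1 : (pre ++ [x]).length = pre.length + 1 := by simp
        have := ih (pre ++ [x]) b lm (max cm x) s (by simp; omega)
          (by
            constructor
            · rw [List.take_append_of_le_length (by omega)]; exact hlm.1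
            · intro a ha
              rw [List.take_append_of_le_length (by omega)] at ha
              exact hlm.2 a ha)
          (by
            constructor
            · rcases max_choice cm x with h | h
              · rw [h]; exact List.mem_append_left _ hcm.1
              · rw [h]; simp
            · intro a ha
              rcases List.mem_append.1 ha with ha | ha
              · exact le_max_of_le_left (hcm.2 a ha)
              · simp at ha; subst ha; exact le_max_right _ _)
          (by rwa [← hassoc]) hbs
        rw [← h1]
        exact this

theorem bLoop_inv (rest : List Int) : ∀ (pre : List Int) (b : Nat) (lm cm : Int),
    b < pre.length → IsMaxOf (pre.take (b + 1)) lm → IsMaxOf pre cm →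
    (∀ y ∈ pre.drop (b + 1), lm < y) →
    bLoop rest pre.length b lm cm < (pre ++ rest).length ∧
    ∀ y ∈ (pre ++ rest).drop (bLoop rest pre.length b lm cm + 1),
      ∀ x ∈ (pre ++ rest).take (bLoop rest pre.length b lm cm + 1), x < y := by
  induction rest with
  | nil =>
      intro pre b lm cm hb hlm hcm hdrop
      simp only [bLoop, List.append_nil]
      refine ⟨hb, ?_⟩
      intro y hy a ha
      exact lt_of_le_of_lt (hlm.2 a ha) (hdrop y hy)
  | cons x rest ih =>
      intro pre b lm cm hb hlm hcm hdrop
      have hlmcm : lm ≤ cm := hcm.2 lm (List.mem_of_mem_take hlm.1)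
      have hassoc : pre ++ x :: rest = (pre ++ [x]) ++ rest := by simp
      simp only [bLoop]
      by_cases hx : x ≤ lm
      · rw [if_pos hx]
        have h1 : (pre ++ [x]).length = pre.length + 1 := by simp
        have := ih (pre ++ [x]) pre.length cm cm (by simp)
          (by
            constructor
            · rw [List.take_of_length_le (by simp)]; exact List.mem_append_left _ hcm.1
            · intro a ha
              rw [List.take_of_length_le (by simp)] at ha
              rcases List.mem_append.1 ha with ha | ha
              · exact hcm.2 a ha
              · simp at ha; omega)
          (by
            constructor
            · exact List.mem_append_left _ hcm.1
            · intro a ha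
              rcases List.mem_append.1 ha with ha | ha
              · exact hcm.2 a ha
              · simp at ha; omega)
          (by intro y hy; rw [List.drop_of_length_le (by simp)] at hy; simp at hy)
        rw [← h1, hassoc]
        exact this
      · rw [if_neg hx]
        have h1 : (pre ++ [x]).length = pre.length + 1 := by simp
        have := ih (pre ++ [x]) b lm (max cm x) (by simp; omega)
          (by
            constructor
            · rw [List.take_append_of_le_length (by omega)]; exact hlm.1
            · intro a ha
              rw [List.take_append_of_le_length (by omega)] at ha
              exact hlm.2 a ha)
          (by
            constructor
            · rcases max_choice cm x with h | h
              · rw [h]; exact List.mem_append_left _ hcm.1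
              · rw [h]; simp
            · intro a ha
              rcases List.mem_append.1 ha with ha | ha
              · exact le_max_of_le_left (hcm.2 a ha)
              · simp at ha; subst ha; exact le_max_right _ _)
          (by
            intro y hy
            rw [List.drop_append_of_le_length (by omega)] at hy
            rcases List.mem_append.1 hy with hy | hy
            · exact hdrop y hy
            · simp at hy; subst hy; omega)
        rw [← h1, hassoc]
        exact this

theorem B_iff (x : Int) (xs : List Int) :
    bLoop xs 1 0 x x < xs.length ↔ ExSplit (x :: xs) := by
  have hinit1 : IsMaxOf ([x].take 1) x := by simp [IsMaxOf]
  have hinit2 : IsMaxOf [x] x := by simp [IsMaxOf]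
  have hlen : ([x] : List Int).length = 1 := by simp
  constructor
  · intro h
    have := bLoop_inv xs [x] 0 x x (by simp) hinit1 hinit2 (by simp)
    rw [hlen] at this
    refine ⟨bLoop xs 1 0 x x, ?_, ?_⟩
    · simpa using Nat.add_lt_add_right h 1
    · simpa using this.2
  · rintro ⟨s, hs1, hs2⟩
    have hg : Good ([x] ++ xs) s := ⟨by simpa using hs1, by simpa using hs2⟩
    have := bLoop_le xs [x] 0 x x s (by simp) hinit1 hinit2 hg (by omega)
    rw [hlen] at this
    simp at hs1
    omega

-- ---- assembling ----

theorem solve_alt_eq (nums : List Int) : solve_alt nums = solve nums := by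
  rw [solve_eq_R]
  cases nums with
  | nil => simp [solve_alt, R]
  | cons x xs =>
      cases xs with
      | nil => simp [solve_alt, R]
      | cons z zs =>
          rw [solve_alt]
          rw [if_neg (by simp)]
          have h1 : ((x :: z :: zs).length - 1) = (z :: zs).length := by simp
          rw [h1]
          by_cases h : ExSplit (x :: z :: zs)
          · rw [decide_eq_true ((B_iff x (z :: zs)).2 h), (R_none_iff _).2 h]
          · rw [decide_eq_false (fun hc => h ((B_iff x (z :: zs)).1 hc))]
            rcases hR : R none (x :: z :: zs) with _ | _
            · rfl
            · exact absurd ((R_none_iff _).1 hR) h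

-- ===== VERDICT (by name: the statement is the Claim_ definition above) =====
theorem solve_spec : Claim_equal_solve := by
  intro nums _
  unfold Spec_solve
  exact (solve_alt_eq nums).symm
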